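-- pv_equiv track=rewrite | github.com/jorged104/Estructuras-de-datos-Arbol-B | TablaHash.py | Fhash
-- ===== SOURCE A (Python) =====
-- def Fhash(dato):
-- 	acumulado = 0
-- 	for Caracter in enumerate(dato):
-- 		acumulado =	acumulado + ord(Caracter[1])
-- 	res = acumulado * acumulado
-- 	i = int(len(str(res))/2)
-- 	res = str(res)
-- 	retorno = int(res[i-1]) + int(res[i])
-- 	return retorno
-- ===== SOURCE B (Python) =====
-- def Fhash(dato):
--     res = sum(map(ord, dato)) ** 2
--     # count decimal digits of res arithmetically (res == 0 has one digit)
--     d, t = 1, res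
--     while t >= 10:
--         t //= 10
--         d += 1
--     i = d // 2
--     if i == 0:
--         # single-digit square: both middle positions name that digit
--         return 2 * res
--     return (res // 10 ** (d - i)) % 10 + (res // 10 ** (d - 1 - i)) % 10
-- ===== Notes on version B (the rewrite author's own statement) =====
-- stated objective: alternative
-- what changed: B replaces A's convert-to-string-and-index digit extraction by pure arithmetic: it counts the decimal digits of the squared ordinal sum with a division loop and extracts the two middle digits with // 10**k % 10, with an explicit 2*res branch for the single-digit case that A reaches via negative string indexing.
import Mathlib
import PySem

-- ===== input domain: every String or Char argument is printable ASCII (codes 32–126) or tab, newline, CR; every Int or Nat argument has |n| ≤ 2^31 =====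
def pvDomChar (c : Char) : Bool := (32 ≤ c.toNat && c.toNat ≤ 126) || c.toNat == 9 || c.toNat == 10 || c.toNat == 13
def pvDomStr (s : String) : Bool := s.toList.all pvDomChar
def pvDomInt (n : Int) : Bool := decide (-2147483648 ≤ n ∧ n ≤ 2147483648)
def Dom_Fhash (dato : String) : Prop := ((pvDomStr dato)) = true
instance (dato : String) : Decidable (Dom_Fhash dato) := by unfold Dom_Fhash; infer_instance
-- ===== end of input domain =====

-- B extracts the two middle digits of the squared ordinal sum arithmetically (digit-count loop and // 10**k % 10)
-- instead of A's str() conversion and string indexing; alternative decomposition, same cost.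

-- ===== PORT A =====
def Fhash (dato : String) : Int :=
  -- acumulado = 0; for Caracter in enumerate(dato): acumulado = acumulado + ord(Caracter[1])
  let acumulado : Int :=
    (PySem.List.enumerate dato.toList).foldl (fun a p => a + (p.2.toNat : Int)) 0
  let res : Int := acumulado * acumulado
  -- i = int(len(str(res))/2): true division of the small nonneg length by 2 then int() truncation,
  -- which is exactly floor division for these lengths
  let i : Int := PySem.Int.floordiv (PySem.Str.len (PySem.Int.toStr res)) 2
  -- res = str(res)
  let resL : List Char := (PySem.Int.toStr res).toList
  -- retorno = int(res[i-1]) + int(res[i]); the indexings and int() always succeed, so .getD 0 is unreachable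
  ((PySem.List.pyGet? resL (i - 1)).bind (fun c => PySem.Int.ofChars? [c])).getD 0 +
  ((PySem.List.pyGet? resL i).bind (fun c => PySem.Int.ofChars? [c])).getD 0

-- ===== PORT B =====
-- while t >= 10: t //= 10; d += 1   (structural fuel = t.toNat, enough for the loop; keeps the port kernel-reducible)
def pvCountDigitsGo (fuel : Nat) (t : Int) (d : Int) : Int :=
  match fuel with
  | 0 => d
  | fuel + 1 => if 10 ≤ t then pvCountDigitsGo fuel (PySem.Int.floordiv t 10) (d + 1) else d

def pvCountDigits (t : Int) (d : Int) : Int := pvCountDigitsGo t.toNat t d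

def Fhash_alt (dato : String) : Int :=
  let res : Int := ((dato.toList.map (fun c => (c.toNat : Int))).sum) ^ 2
  let d : Int := pvCountDigits res 1
  let i : Int := PySem.Int.floordiv d 2
  if i = 0 then 2 * res
  else
    -- the exponents d - i and d - 1 - i are nonnegative here, so .toNat is exact
    PySem.Int.mod (PySem.Int.floordiv res (10 ^ (d - i).toNat)) 10 +
    PySem.Int.mod (PySem.Int.floordiv res (10 ^ (d - 1 - i).toNat)) 10

-- ===== PRECONDITION & SPEC =====
def Spec_Fhash (dato : String) (out : Int) : Prop := out = Fhash_alt dato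
instance (dato : String) (out : Int) : Decidable (Spec_Fhash dato out) := by unfold Spec_Fhash; infer_instance

-- ===== CLAIM (what is proved, stated in full; the proofs are below) =====
def Claim_equal_Fhash : Prop := ∀ (dato : String), Dom_Fhash dato → Spec_Fhash dato (Fhash dato)

-- ===== LEMMAS AND PROOFS =====

theorem countDigitsGo_eq (fuel : Nat) : ∀ (n : ℕ) (k : Int), n ≤ fuel →
    pvCountDigitsGo fuel (n : Int) k = k + ((Nat.toDigits 10 n).length : Int) - 1 := by
  induction fuel with
  | zero =>
    intro n k hn
    have h0 : n = 0 := Nat.le_zero.mp hn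
    subst h0
    simp [pvCountDigitsGo, Nat.toDigits_zero]
  | succ fuel ih =>
    intro n k hn
    by_cases h : (10 : Int) ≤ (n : Int)
    · have hn10 : 10 ≤ n := by exact_mod_cast h
      have hfd : PySem.Int.floordiv (n : Int) 10 = ((n / 10 : ℕ) : Int) := by
        exact_mod_cast PySem.Int.floordiv_natCast n 10
      rw [pvCountDigitsGo, if_pos h, hfd,
        ih (n / 10) (k + 1) (by omega)]
      rw [Nat.toDigits_of_base_le (by norm_num) hn10]
      simp [List.length_append]
      ring
    · have hn10 : n < 10 := by exact_mod_cast not_le.mp h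
      rw [pvCountDigitsGo, if_neg h, Nat.toDigits_of_lt_base hn10]
      simp

theorem countDigits_eq (n : ℕ) (k : Int) :
    pvCountDigits (n : Int) k = k + ((Nat.toDigits 10 n).length : Int) - 1 := by
  have : ((n : Int)).toNat = n := Int.toNat_natCast n
  rw [pvCountDigits, this]
  exact countDigitsGo_eq n n k le_rfl

theorem toDigits_get (n : ℕ) : ∀ j : ℕ, j < (Nat.toDigits 10 n).length →
    (Nat.toDigits 10 n)[(Nat.toDigits 10 n).length - 1 - j]? = some (Nat.digitChar (n / 10 ^ j % 10)) := by
  induction n using Nat.strong_induction_on with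
  | _ n ih =>
    intro j hj
    by_cases h : 10 ≤ n
    · rw [Nat.toDigits_of_base_le (by norm_num) h] at hj ⊢
      have hpos : 0 < (Nat.toDigits 10 (n / 10)).length := Nat.length_toDigits_pos
      cases j with
      | zero =>
        simp only [List.length_append, List.length_cons, List.length_nil]
        have : (Nat.toDigits 10 (n / 10)).length + 1 - 1 - 0 = (Nat.toDigits 10 (n / 10)).length := by omega
        rw [this, List.getElem?_append_right (by omega)]
        simp
      | succ j' =>
        simp only [List.length_append, List.length_cons, List.length_nil] at hj ⊢
        have hj' : j' < (Nat.toDigits 10 (n / 10)).length := by omega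
        have hidx : (Nat.toDigits 10 (n / 10)).length + 1 - 1 - (j' + 1)
            = (Nat.toDigits 10 (n / 10)).length - 1 - j' := by omega
        rw [hidx, List.getElem?_append_left (by omega)]
        rw [ih (n / 10) (Nat.div_lt_self (by omega) (by norm_num)) j' hj']
        congr 2
        rw [Nat.div_div_eq_div_mul, pow_succ]
        ring_nf
    · have hn : n < 10 := not_le.mp h
      rw [Nat.toDigits_of_lt_base hn] at hj ⊢
      simp only [List.length_singleton] at hj
      interval_cases j
      simp [Nat.mod_eq_of_lt hn]

theorem digit_parse (k : ℕ) (hk : k < 10) : PySem.Int.ofChars? [Nat.digitChar k] = some (k : Int) := by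
  interval_cases k <;> decide

theorem enum_sum (l : List Char) : ∀ (start a : Int),
    (PySem.List.enumerate l start).foldl (fun s p => s + (p.2.toNat : Int)) a
      = a + (((l.map Char.toNat).sum : ℕ) : Int) := by
  induction l with
  | nil => intro start a; simp [PySem.List.enumerate]
  | cons c t ih =>
    intro start a
    simp only [PySem.List.enumerate, List.foldl_cons, List.map_cons, List.sum_cons]
    rw [ih (start + 1) (a + (c.toNat : Int))]
    push_cast
    ring

theorem sum_cast (l : List Char) :
    (l.map (fun c => ((c.toNat : Int)))).sum = (((l.map Char.toNat).sum : ℕ) : Int) := by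
  induction l with
  | nil => simp
  | cons c t ih => simp [ih]

theorem toList_toStr_natCast (n : ℕ) : (PySem.Int.toStr (n : Int)).toList = Nat.toDigits 10 n := by
  simp [PySem.Int.toStr, PySem.Int.toChars, String.toList_ofList]

theorem tail_eq (n : ℕ) :
    ((PySem.List.pyGet? (PySem.Int.toStr (n : Int)).toList
        (PySem.Int.floordiv (PySem.Str.len (PySem.Int.toStr (n : Int))) 2 - 1)).bind
      (fun c => PySem.Int.ofChars? [c])).getD 0 +
    ((PySem.List.pyGet? (PySem.Int.toStr (n : Int)).toList
        (PySem.Int.floordiv (PySem.Str.len (PySem.Int.toStr (n : Int))) 2)).bind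
      (fun c => PySem.Int.ofChars? [c])).getD 0
    = (if PySem.Int.floordiv (pvCountDigits (n : Int) 1) 2 = 0 then 2 * (n : Int)
       else
        PySem.Int.mod (PySem.Int.floordiv (n : Int)
          (10 ^ (pvCountDigits (n : Int) 1 - PySem.Int.floordiv (pvCountDigits (n : Int) 1) 2).toNat)) 10 +
        PySem.Int.mod (PySem.Int.floordiv (n : Int)
          (10 ^ (pvCountDigits (n : Int) 1 - 1 - PySem.Int.floordiv (pvCountDigits (n : Int) 1) 2).toNat)) 10) := by
  have hL : (PySem.Int.toStr (n : Int)).toList = Nat.toDigits 10 n := toList_toStr_natCast n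
  have hlen : PySem.Str.len (PySem.Int.toStr (n : Int)) = ((Nat.toDigits 10 n).length : Int) := by
    rw [PySem.Str.len_eq, hL]
  have hpos : 0 < (Nat.toDigits 10 n).length := Nat.length_toDigits_pos
  have hd : pvCountDigits (n : Int) 1 = ((Nat.toDigits 10 n).length : Int) := by
    rw [countDigits_eq]; ring
  have hi : PySem.Int.floordiv (((Nat.toDigits 10 n).length : ℕ) : Int) 2
      = (((Nat.toDigits 10 n).length / 2 : ℕ) : Int) := by
    exact_mod_cast PySem.Int.floordiv_natCast (Nat.toDigits 10 n).length 2
  set L := Nat.toDigits 10 n with hLdef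
  set len := L.length with hlendef
  set i0 := len / 2 with hi0def
  have hlenL : (Nat.toDigits 10 n).length = len := rfl
  have hi0lt : i0 < len := Nat.div_lt_self hpos one_lt_two
  rw [hL, hlen, hd, hi]
  by_cases hc : i0 = 0
  · -- single-digit square: both sides add the unique digit to itself
    have hlen1 : len = 1 := by omega
    have hn10 : n < 10 := by
      by_contra h10
      have h10' : 10 ≤ n := not_lt.mp h10
      have h2 : L = Nat.toDigits 10 (n / 10) ++ [(n % 10).digitChar] :=
        Nat.toDigits_of_base_le (by norm_num) h10'
      have : 0 < (Nat.toDigits 10 (n / 10)).length := Nat.length_toDigits_pos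
      have : len = (Nat.toDigits 10 (n / 10)).length + 1 := by
        rw [hlendef, h2]; simp
      omega
    have hLn : L = [Nat.digitChar n] := Nat.toDigits_of_lt_base hn10
    rw [hc]
    simp only [Nat.cast_zero, zero_sub]
    have hm1 : PySem.List.pyGet? L (-1) = some (Nat.digitChar n) := by
      rw [hLn]
      simp [PySem.List.pyGet?, PySem.List.pyIdx?]
    have h0 : PySem.List.pyGet? L 0 = some (Nat.digitChar n) := by
      rw [hLn]
      simp [PySem.List.pyGet?, PySem.List.pyIdx?]
    rw [hm1, h0]
    simp [digit_parse n hn10, two_mul]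
  · -- two (possibly equal) genuine middle digits
    have hi0pos : 0 < i0 := Nat.pos_of_ne_zero hc
    have hif : ¬ ((i0 : Int) = 0) := by exact_mod_cast hc
    rw [if_neg hif]
    -- A, second term: character i0 is digit len-1-i0 from the right
    have hg2 : L[i0]? = some (Nat.digitChar (n / 10 ^ (len - 1 - i0) % 10)) := by
      have h := toDigits_get n (len - 1 - i0) (by omega)
      rwa [show len - 1 - (len - 1 - i0) = i0 by omega] at h
    have hget2 : PySem.List.pyGet? L (i0 : Int) = some (Nat.digitChar (n / 10 ^ (len - 1 - i0) % 10)) := by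
      simp only [PySem.List.pyGet?, PySem.List.pyIdx?]
      rw [if_pos (by positivity), if_pos (by exact_mod_cast hi0lt)]
      simpa using hg2
    -- A, first term: character i0-1 is digit len-i0 from the right
    have hg1 : L[i0 - 1]? = some (Nat.digitChar (n / 10 ^ (len - i0) % 10)) := by
      have h := toDigits_get n (len - i0) (by omega)
      rwa [show len - 1 - (len - i0) = i0 - 1 by omega] at h
    have hcast1 : ((i0 : Int) - 1) = ((i0 - 1 : ℕ) : Int) := by omega
    have hget1 : PySem.List.pyGet? L ((i0 : Int) - 1) = some (Nat.digitChar (n / 10 ^ (len - i0) % 10)) := by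
      rw [hcast1]
      simp only [PySem.List.pyGet?, PySem.List.pyIdx?]
      rw [if_pos (by positivity), if_pos (by exact_mod_cast (by omega : i0 - 1 < len))]
      simpa using hg1
    rw [hget1, hget2]
    have hp1 := digit_parse (n / 10 ^ (len - i0) % 10) (Nat.mod_lt _ (by norm_num))
    have hp2 := digit_parse (n / 10 ^ (len - 1 - i0) % 10) (Nat.mod_lt _ (by norm_num))
    -- B: turn the Int arithmetic into the same Nat digits
    have he1 : (((len : ℕ) : Int) - ((i0 : ℕ) : Int)).toNat = len - i0 := by omega
    have he2 : (((len : ℕ) : Int) - 1 - ((i0 : ℕ) : Int)).toNat = len - 1 - i0 := by omega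
    have hb : ∀ e : ℕ, PySem.Int.mod (PySem.Int.floordiv (n : Int) (10 ^ e)) 10
        = ((n / 10 ^ e % 10 : ℕ) : Int) := by
      intro e
      have h1 : PySem.Int.floordiv (n : Int) ((10 : Int) ^ e) = ((n / 10 ^ e : ℕ) : Int) := by
        exact_mod_cast PySem.Int.floordiv_natCast n (10 ^ e)
      rw [h1]
      exact_mod_cast PySem.Int.mod_natCast (n / 10 ^ e) 10
    rw [he1, he2, hb (len - i0), hb (len - 1 - i0)]
    simp [hp1, hp2]

-- ===== VERDICT (by name: the statement is the Claim_ definition above) =====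
theorem Fhash_spec : Claim_equal_Fhash := by
  unfold Claim_equal_Fhash
  intro dato _
  unfold Spec_Fhash
  show Fhash dato = Fhash_alt dato
  simp only [Fhash, Fhash_alt]
  rw [enum_sum dato.toList 0 0, sum_cast dato.toList]
  rw [show ((0 : Int) + (((dato.toList.map Char.toNat).sum : ℕ) : Int)) = (((dato.toList.map Char.toNat).sum : ℕ) : Int) by ring]
  set m := (dato.toList.map Char.toNat).sum with hm
  rw [show ((m : Int) * (m : Int)) = ((m * m : ℕ) : Int) by push_cast; ring,
    show ((m : Int)) ^ 2 = ((m * m : ℕ) : Int) by push_cast; ring]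
  exact tail_eq (m * m)
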